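-- pv_equiv track=rewrite | github.com/dfo-meds/data-manager | src/pipeman/builtins/iso19115/util.py | _has_other_languages
-- ===== SOURCE A (Python) =====
-- def _has_other_languages(language_dict, default_locale, supported_locales):
--     for key in language_dict:
--         if key == "und" or key == default_locale:
--             continue
--         if key not in supported_locales:
--             continue
--         return True
--     return False
-- ===== SOURCE B (Python) =====
-- def _has_other_languages(language_dict, default_locale, supported_locales):
--     keys = set(language_dict)
--     return any(loc in keys
--                for loc in supported_locales
--                if loc != "und" and loc != default_locale)
-- ===== Notes on version B (the rewrite author's own statement) =====
-- stated objective: alternative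
-- what changed: Inverted the traversal: instead of scanning each dict key against supported_locales (A), B builds a hash set of the dict's keys once and scans supported_locales, testing each non-"und", non-default locale for membership in that set; correct because both compute existence of a key that is a supported locale other than "und"/default_locale, and existence does not depend on which collection is scanned.
import Mathlib
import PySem

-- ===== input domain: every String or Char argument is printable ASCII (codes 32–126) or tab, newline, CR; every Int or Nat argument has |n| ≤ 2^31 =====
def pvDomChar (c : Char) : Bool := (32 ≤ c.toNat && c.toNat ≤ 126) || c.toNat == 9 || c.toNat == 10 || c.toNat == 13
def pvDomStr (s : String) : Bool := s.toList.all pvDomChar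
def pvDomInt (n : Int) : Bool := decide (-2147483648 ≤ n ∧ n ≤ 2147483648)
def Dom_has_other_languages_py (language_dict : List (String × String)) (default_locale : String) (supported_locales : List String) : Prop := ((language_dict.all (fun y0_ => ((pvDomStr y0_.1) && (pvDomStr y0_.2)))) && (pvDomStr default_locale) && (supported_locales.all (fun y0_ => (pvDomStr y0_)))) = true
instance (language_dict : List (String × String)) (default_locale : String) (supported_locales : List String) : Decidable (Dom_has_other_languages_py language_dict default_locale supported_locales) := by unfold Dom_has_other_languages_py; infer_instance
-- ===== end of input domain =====

-- B inverts the traversal: it builds a key set of language_dict once and scans supported_locales against it,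
-- instead of A's scan of each dict key against supported_locales (objective: alternative).

-- ===== PORT A =====
-- the 'for key in language_dict: … return True / return False' loop, as structural recursion over the keys
def holA_loop (default_locale : String) (supported_locales : List String) : List (String × String) → Bool
  | [] => false
  | (key, _) :: rest =>
    if key == "und" || key == default_locale then holA_loop default_locale supported_locales rest
    else if !(supported_locales.contains key) then holA_loop default_locale supported_locales rest
    else true

def has_other_languages_py (language_dict : List (String × String)) (default_locale : String) (supported_locales : List String) : Bool :=
  holA_loop default_locale supported_locales language_dict

-- ===== PORT B =====
def has_other_languages_py_alt (language_dict : List (String × String)) (default_locale : String) (supported_locales : List String) : Bool :=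
  let keys : PySem.Set String := PySem.Set.ofList (language_dict.map Prod.fst)
  supported_locales.any (fun loc =>
    (loc != "und" && loc != default_locale) && PySem.Set.contains keys loc)

-- ===== PRECONDITION & SPEC =====
def Spec_has_other_languages_py (language_dict : List (String × String)) (default_locale : String) (supported_locales : List String) (out : Bool) : Prop := out = has_other_languages_py_alt language_dict default_locale supported_locales
instance (language_dict : List (String × String)) (default_locale : String) (supported_locales : List String) (out : Bool) : Decidable (Spec_has_other_languages_py language_dict default_locale supported_locales out) := by unfold Spec_has_other_languages_py; infer_instance

-- ===== CLAIM (what is proved, stated in full; the proofs are below) =====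
def Claim_equal_has_other_languages_py : Prop := ∀ (language_dict : List (String × String)) (default_locale : String) (supported_locales : List String), Dom_has_other_languages_py language_dict default_locale supported_locales → Spec_has_other_languages_py language_dict default_locale supported_locales (has_other_languages_py language_dict default_locale supported_locales)

-- ===== LEMMAS AND PROOFS =====

-- A's loop returns true iff some key is a supported locale other than "und"/default_locale
theorem holA_loop_eq_true_iff (d : String) (s : List String) (l : List (String × String)) :
    holA_loop d s l = true ↔ ∃ p ∈ l, p.1 ≠ "und" ∧ p.1 ≠ d ∧ p.1 ∈ s := by
  induction l with
  | nil => simp [holA_loop]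
  | cons hd tl ih =>
    obtain ⟨k, v⟩ := hd
    simp only [holA_loop]
    split_ifs with h1 h2
    · simp only [Bool.or_eq_true, beq_iff_eq] at h1
      rw [ih]
      constructor
      · rintro ⟨p, hp, h⟩; exact ⟨p, List.mem_cons_of_mem _ hp, h⟩
      · rintro ⟨p, hp, h⟩
        rcases List.mem_cons.mp hp with rfl | hp
        · rcases h1 with rfl | rfl
          · exact absurd rfl h.1
          · exact absurd rfl h.2.1
        · exact ⟨p, hp, h⟩
    · simp only [Bool.or_eq_true, beq_iff_eq, not_or] at h1
      simp only [Bool.not_eq_true'] at h2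
      rw [ih]
      constructor
      · rintro ⟨p, hp, h⟩; exact ⟨p, List.mem_cons_of_mem _ hp, h⟩
      · rintro ⟨p, hp, h⟩
        rcases List.mem_cons.mp hp with rfl | hp
        · exact absurd (List.contains_iff_mem.mpr h.2.2) (by simp_all)
        · exact ⟨p, hp, h⟩
    · simp only [Bool.or_eq_true, beq_iff_eq, not_or] at h1
      simp only [Bool.not_eq_true', Bool.not_eq_false] at h2
      constructor
      · intro _; exact ⟨(k, v), List.mem_cons_self, h1.1, h1.2, List.contains_iff_mem.mp h2⟩
      · intro _; rfl

-- B returns true iff some supported locale other than "und"/default_locale is a key of the dict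
theorem hol_alt_eq_true_iff (d : String) (s : List String) (l : List (String × String)) :
    has_other_languages_py_alt l d s = true ↔ ∃ p ∈ l, p.1 ≠ "und" ∧ p.1 ≠ d ∧ p.1 ∈ s := by
  simp only [has_other_languages_py_alt, List.any_eq_true, Bool.and_eq_true, bne_iff_ne,
    PySem.Set.contains, List.contains_eq_mem, decide_eq_true_eq, PySem.Set.mem_ofList,
    List.mem_map]
  constructor
  · rintro ⟨loc, hls, ⟨h1, h2⟩, ⟨p, hp, rfl⟩⟩
    exact ⟨p, hp, h1, h2, hls⟩
  · rintro ⟨p, hp, h1, h2, hs⟩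
    exact ⟨p.1, hs, ⟨h1, h2⟩, ⟨p, hp, rfl⟩⟩

-- ===== VERDICT (by name: the statement is the Claim_ definition above) =====
theorem has_other_languages_py_spec : Claim_equal_has_other_languages_py := by
  intro l d s _
  unfold Spec_has_other_languages_py has_other_languages_py
  rw [Bool.eq_iff_iff, holA_loop_eq_true_iff, hol_alt_eq_true_iff]
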